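-- pv_equiv track=rewrite | github.com/colinnnnnnnnnnn/aa-labs | lab3/program.py | disconnected_graph
-- ===== SOURCE A (Python) =====
-- def disconnected_graph(component_a_size, component_b_size):
-- 	total = component_a_size + component_b_size
-- 	graph = {i: [] for i in range(total)}
--
-- 	for i in range(component_a_size - 1):
-- 		graph[i].append(i + 1)
-- 		graph[i + 1].append(i)
--
-- 	offset = component_a_size
-- 	for i in range(offset, offset + component_b_size - 1):
-- 		graph[i].append(i + 1)
-- 		graph[i + 1].append(i)
--
-- 	return graph
-- ===== SOURCE B (Python) =====
-- def disconnected_graph(component_a_size, component_b_size):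
--     total = component_a_size + component_b_size
--     graph = {}
--     for i in range(total):
--         neighbors = []
--         if i > 0 and i != component_a_size:
--             neighbors.append(i - 1)
--         if i < total - 1 and i != component_a_size - 1:
--             neighbors.append(i + 1)
--         graph[i] = neighbors
--     return graph
-- ===== Notes on version B (the rewrite author's own statement) =====
-- stated objective: simpler
-- what changed: Replaced A's empty-list initialisation followed by two edge-walking loops (each appending to two dict entries) with a single node-centric pass that builds each vertex's neighbour list [i-1?, i+1?] directly from its position relative to the component boundary.
import Mathlib
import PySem

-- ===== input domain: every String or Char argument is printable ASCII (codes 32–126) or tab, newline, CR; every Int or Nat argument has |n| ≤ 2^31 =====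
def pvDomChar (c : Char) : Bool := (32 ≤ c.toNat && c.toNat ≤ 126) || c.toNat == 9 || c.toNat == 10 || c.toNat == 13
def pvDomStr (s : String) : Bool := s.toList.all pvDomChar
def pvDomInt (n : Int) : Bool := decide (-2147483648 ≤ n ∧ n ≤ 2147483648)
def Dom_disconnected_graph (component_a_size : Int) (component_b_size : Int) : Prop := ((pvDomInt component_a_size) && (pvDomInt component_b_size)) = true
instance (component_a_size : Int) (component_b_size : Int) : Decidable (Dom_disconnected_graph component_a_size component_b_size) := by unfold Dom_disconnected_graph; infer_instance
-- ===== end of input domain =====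

-- B replaces A's initialise-then-two-edge-walking-loops by one node-centric pass that computes
-- each vertex's neighbour list from its position (objective: simpler; same cost).

-- ===== PORT A =====
-- the body of A's edge loops: graph[i].append(i+1); graph[i+1].append(i)
def dgStep (d : PySem.Dict Int (List Int)) (i : Int) : PySem.Dict Int (List Int) :=
  (d.modify i [] (fun l => l ++ [i + 1])).modify (i + 1) [] (fun l => l ++ [i])

def disconnected_graph (component_a_size : Int) (component_b_size : Int) : List (Int × List Int) :=
  let total := component_a_size + component_b_size
  let graph : PySem.Dict Int (List Int) :=
    (PySem.List.pyRange 0 total 1).foldl (fun d i => d.insert i []) PySem.Dict.empty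
  let graph := (PySem.List.pyRange 0 (component_a_size - 1) 1).foldl dgStep graph
  let offset := component_a_size
  let graph := (PySem.List.pyRange offset (offset + component_b_size - 1) 1).foldl dgStep graph
  graph.items

-- ===== PORT B =====
def disconnected_graph_alt (component_a_size : Int) (component_b_size : Int) : List (Int × List Int) :=
  let total := component_a_size + component_b_size
  ((PySem.List.pyRange 0 total 1).foldl
      (fun d i =>
        d.insert i
          ((if 0 < i ∧ i ≠ component_a_size then [i - 1] else []) ++
           (if i < total - 1 ∧ i ≠ component_a_size - 1 then [i + 1] else [])))
      PySem.Dict.empty).items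

-- ===== PRECONDITION & SPEC =====
-- Pre_ excludes exactly the inputs where A raises KeyError (a negative size whose partner's
-- edge loop touches vertices outside the dict); A returns normally on every input admitted here.
def Pre_disconnected_graph (component_a_size : Int) (component_b_size : Int) : Prop :=
  (0 ≤ component_a_size ∧ 0 ≤ component_b_size) ∨
  (component_a_size < 0 ∧ component_b_size ≤ 1) ∨
  (component_b_size < 0 ∧ component_a_size ≤ 1)
instance (component_a_size : Int) (component_b_size : Int) : Decidable (Pre_disconnected_graph component_a_size component_b_size) := by unfold Pre_disconnected_graph; infer_instance

def pvWitness_disconnected_graph : Int × Int := (2, 3)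

def Spec_disconnected_graph (component_a_size : Int) (component_b_size : Int) (out : List (Int × List Int)) : Prop := out = disconnected_graph_alt component_a_size component_b_size
instance (component_a_size : Int) (component_b_size : Int) (out : List (Int × List Int)) : Decidable (Spec_disconnected_graph component_a_size component_b_size out) := by unfold Spec_disconnected_graph; infer_instance

-- ===== CLAIM (what is proved, stated in full; the proofs are below) =====
def Claim_equal_disconnected_graph : Prop := ∀ (component_a_size : Int) (component_b_size : Int), Dom_disconnected_graph component_a_size component_b_size → Pre_disconnected_graph component_a_size component_b_size → Spec_disconnected_graph component_a_size component_b_size (disconnected_graph component_a_size component_b_size)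


-- ===== LEMMAS AND PROOFS =====

-- one edge step appends i+1 to entry i and i to entry i+1
lemma dgStep_getD (d : PySem.Dict Int (List Int)) (i k : Int) :
    (dgStep d i).getD k [] =
      d.getD k [] ++ (if k = i then [i + 1] else if k = i + 1 then [i] else []) := by
  unfold dgStep
  rw [PySem.Dict.getD_modify, PySem.Dict.getD_modify, PySem.Dict.getD_modify]
  split_ifs <;> simp_all

-- contents after an edge loop over range(a0, a0+m)
lemma loop_getD_nat (m : ℕ) : ∀ (a0 k : Int) (d : PySem.Dict Int (List Int)),
    ((PySem.List.pyRange a0 (a0 + m) 1).foldl dgStep d).getD k [] =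
      d.getD k [] ++ (if a0 ≤ k - 1 ∧ k - 1 < a0 + m then [k - 1] else []) ++
        (if a0 ≤ k ∧ k < a0 + m then [k + 1] else []) := by
  induction m with
  | zero =>
    intro a0 k d
    rw [show a0 + (0:ℕ) = a0 by simp, PySem.List.pyRange_one_eq_nil le_rfl]
    simp only [List.foldl_nil]
    split_ifs <;> simp <;> omega
  | succ n ih =>
    intro a0 k d
    rw [PySem.List.pyRange_one_cons (by push_cast; omega), List.foldl_cons,
      show a0 + ((n:ℕ)+1 : ℕ) = (a0 + 1) + (n:ℕ) by push_cast; ring]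
    rw [ih (a0 + 1) k (dgStep d a0), dgStep_getD]
    generalize d.getD k [] = L
    split_ifs <;> simp [List.append_assoc] <;> omega

lemma loop_getD (a0 b0 k : Int) (d : PySem.Dict Int (List Int)) :
    ((PySem.List.pyRange a0 b0 1).foldl dgStep d).getD k [] =
      d.getD k [] ++ (if a0 ≤ k - 1 ∧ k - 1 < b0 then [k - 1] else []) ++
        (if a0 ≤ k ∧ k < b0 then [k + 1] else []) := by
  rcases (by omega : b0 ≤ a0 ∨ a0 < b0) with h | h
  · rw [PySem.List.pyRange_one_eq_nil h, List.foldl_nil]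
    split_ifs <;> simp <;> omega
  · have : b0 = a0 + ((b0 - a0).toNat : ℕ) := by omega
    rw [this]
    exact loop_getD_nat _ a0 k d

lemma dgStep_keys (d : PySem.Dict Int (List Int)) (i : Int)
    (h1 : d.contains i = true) (h2 : d.contains (i + 1) = true) :
    (dgStep d i).keys = d.keys := by
  unfold dgStep
  rw [PySem.Dict.keys_modify, PySem.Dict.keys_insert_of_contains _ _
        (by rw [PySem.Dict.contains_modify]; simp [h2]),
    PySem.Dict.keys_modify, PySem.Dict.keys_insert_of_contains _ _ h1]

lemma dgStep_contains (d : PySem.Dict Int (List Int)) (i k : Int) :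
    (dgStep d i).contains k = (k == i + 1 || (k == i || d.contains k)) := by
  unfold dgStep
  rw [PySem.Dict.contains_modify, PySem.Dict.contains_modify]

-- an edge loop that only touches existing keys leaves the key list unchanged
lemma loop_keys (m : ℕ) : ∀ (a0 : Int) (d : PySem.Dict Int (List Int)),
    (∀ i, a0 ≤ i → i < a0 + m → d.contains i = true ∧ d.contains (i + 1) = true) →
    ((PySem.List.pyRange a0 (a0 + m) 1).foldl dgStep d).keys = d.keys := by
  induction m with
  | zero =>
    intro a0 d _
    rw [show a0 + (0:ℕ) = a0 by simp, PySem.List.pyRange_one_eq_nil le_rfl, List.foldl_nil]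
  | succ n ih =>
    intro a0 d h
    rw [PySem.List.pyRange_one_cons (by push_cast; omega), List.foldl_cons,
      show a0 + ((n:ℕ)+1 : ℕ) = (a0 + 1) + (n:ℕ) by push_cast; ring]
    have hc := h a0 (le_refl a0) (by push_cast; omega)
    rw [ih (a0 + 1) (dgStep d a0) ?_, dgStep_keys d a0 hc.1 hc.2]
    intro i hi1 hi2
    have := h i (by omega) (by push_cast at hi2 ⊢; omega)
    constructor <;> rw [dgStep_contains] <;> simp [this.1, this.2]

lemma loop_keys' (a0 b0 : Int) (d : PySem.Dict Int (List Int))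
    (h : ∀ i, a0 ≤ i → i < b0 → d.contains i = true ∧ d.contains (i + 1) = true) :
    ((PySem.List.pyRange a0 b0 1).foldl dgStep d).keys = d.keys := by
  rcases (by omega : b0 ≤ a0 ∨ a0 < b0) with hle | hlt
  · rw [PySem.List.pyRange_one_eq_nil hle, List.foldl_nil]
  · have hb : b0 = a0 + ((b0 - a0).toNat : ℕ) := by omega
    rw [hb]
    exact loop_keys _ a0 d (fun i h1 h2 => h i h1 (by omega))

-- the dict comprehension {i: [] for i in range(total)}
def initD (total : Int) : PySem.Dict Int (List Int) :=
  (PySem.List.pyRange 0 total 1).foldl (fun d i => d.insert i []) PySem.Dict.empty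

lemma initD_items (total : Int) :
    (initD total).items = (PySem.List.pyRange 0 total 1).map (fun i => (i, ([] : List Int))) := by
  unfold initD
  have := PySem.Dict.items_foldl_insert_fresh (PySem.List.pyRange 0 total 1)
    (fun i => i) (fun _ => ([] : List Int)) PySem.Dict.empty
    (by intro a _; simp) (by simpa using PySem.List.nodup_pyRange_one 0 total)
  simpa using this

lemma initD_keys (total : Int) : (initD total).keys = PySem.List.pyRange 0 total 1 := by
  rw [show (initD total).keys = (initD total).items.map (·.1) from rfl, initD_items]
  simp [Function.comp_def]

lemma initD_getD (total k : Int) : (initD total).getD k [] = [] := by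
  by_cases hk : k ∈ PySem.List.pyRange 0 total 1
  · exact PySem.Dict.getD_of_mem_items (initD total)
      (by rw [initD_items]; exact List.mem_map.mpr ⟨k, hk, rfl⟩)
      (by rw [initD_keys]; exact PySem.List.nodup_pyRange_one 0 total) []
  · exact PySem.Dict.getD_of_not_contains _ _
      (by rw [PySem.Dict.contains_eq_decide_mem_keys, initD_keys]; simpa using hk)

lemma initD_contains (total k : Int) : (initD total).contains k = decide (0 ≤ k ∧ k < total) := by
  rw [PySem.Dict.contains_eq_decide_mem_keys, initD_keys]
  simp [PySem.List.mem_pyRange_one]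

-- B's dict is the node-indexed map of its per-node neighbour formula
lemma alt_items (a b : Int) :
    disconnected_graph_alt a b = (PySem.List.pyRange 0 (a + b) 1).map
      (fun i => (i, (if 0 < i ∧ i ≠ a then [i - 1] else []) ++
                    (if i < a + b - 1 ∧ i ≠ a - 1 then [i + 1] else []))) := by
  unfold disconnected_graph_alt
  have := PySem.Dict.items_foldl_insert_fresh (PySem.List.pyRange 0 (a + b) 1)
    (fun i => i)
    (fun i => (if 0 < i ∧ i ≠ a then [i - 1] else []) ++
              (if i < a + b - 1 ∧ i ≠ a - 1 then [i + 1] else []))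
    PySem.Dict.empty
    (by intro x _; simp) (by simpa using PySem.List.nodup_pyRange_one 0 (a + b))
  simpa using this

-- ===== VERDICT (by name: the statement is the Claim_ definition above) =====
theorem disconnected_graph_spec : Claim_equal_disconnected_graph := by
  intro a b _ hpre
  unfold Spec_disconnected_graph
  unfold Pre_disconnected_graph at hpre
  by_cases hab : 0 ≤ a ∧ 0 ≤ b
  · obtain ⟨ha, hb⟩ := hab
    unfold disconnected_graph
    show ((PySem.List.pyRange a (a + b - 1) 1).foldl dgStep
      ((PySem.List.pyRange 0 (a - 1) 1).foldl dgStep (initD (a + b)))).items =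
      disconnected_graph_alt a b
    set d0 := initD (a + b) with hd0
    set d1 := (PySem.List.pyRange 0 (a - 1) 1).foldl dgStep d0 with hd1
    set d2 := (PySem.List.pyRange a (a + b - 1) 1).foldl dgStep d1 with hd2
    have hk1 : d1.keys = PySem.List.pyRange 0 (a + b) 1 := by
      rw [hd1, loop_keys', initD_keys]
      intro i h1 h2
      rw [hd0, initD_contains, initD_contains]
      constructor <;> simp <;> omega
    have hcont1 : ∀ k, d1.contains k = decide (0 ≤ k ∧ k < a + b) := by
      intro k
      rw [PySem.Dict.contains_eq_decide_mem_keys, hk1]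
      simp [PySem.List.mem_pyRange_one]
    have hk2 : d2.keys = PySem.List.pyRange 0 (a + b) 1 := by
      rw [hd2, loop_keys', hk1]
      intro i h1 h2
      rw [hcont1, hcont1]
      constructor <;> simp <;> omega
    rw [PySem.Dict.items_eq_map_keys d2
      (by rw [hk2]; exact PySem.List.nodup_pyRange_one 0 (a + b)) [], hk2, alt_items]
    apply List.map_congr_left
    intro k hk
    rw [PySem.List.mem_pyRange_one] at hk
    have hval : d2.getD k [] =
        (([] ++ (if 0 ≤ k - 1 ∧ k - 1 < a - 1 then [k - 1] else []) ++
           (if 0 ≤ k ∧ k < a - 1 then [k + 1] else [])) ++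
          (if a ≤ k - 1 ∧ k - 1 < a + b - 1 then [k - 1] else [])) ++
          (if a ≤ k ∧ k < a + b - 1 then [k + 1] else []) := by
      rw [hd2, loop_getD, hd1, loop_getD, hd0, initD_getD]
    rw [hval]
    refine Prod.ext rfl ?_
    simp only [List.nil_append, List.append_assoc]
    split_ifs <;> simp <;> omega
  · have h1 : a + b ≤ 0 := by omega
    have h2 : a - 1 ≤ 0 := by omega
    have h3 : a + b - 1 ≤ a := by omega
    unfold disconnected_graph disconnected_graph_alt
    simp only [PySem.List.pyRange_one_eq_nil h1, PySem.List.pyRange_one_eq_nil h2,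
      PySem.List.pyRange_one_eq_nil h3, List.foldl_nil]
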